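-- pv_equiv track=rewrite | github.com/vseprr/srt-smart-translator | parser.py | format_text_with_lines
-- ===== SOURCE A (Python) =====
-- def format_text_with_lines(text: str, line_count: int) -> str:
--     """
--     Çevrilmiş metni orijinal satır sayısına göre biçimlendirir.
--
--     Args:
--         text: Çevrilmiş metin (tek satır)
--         line_count: Orijinal satır sayısı
--
--     Returns:
--         Satır sonları eklenmiş metin
--     """
--     if line_count <= 1:
--         return text
--
--     text = text.strip()
--     words = text.split()
--
--     if len(words) < line_count:
--         # Yeterli kelime yoksa olduğu gibi döndür
--         return text
--
--     # Kelimeleri eşit oranda satırlara böl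
--     words_per_line = len(words) // line_count
--     remainder = len(words) % line_count
--
--     lines = []
--     start = 0
--
--     for i in range(line_count):
--         # Her satıra kaç kelime
--         count = words_per_line + (1 if i < remainder else 0)
--         end = start + count
--         line = ' '.join(words[start:end])
--         if line:
--             lines.append(line)
--         start = end
--
--     return '\n'.join(lines)
-- ===== SOURCE B (Python) =====
-- def format_text_with_lines(text: str, line_count: int) -> str:
--     if line_count <= 1:
--         return text
--     text = text.strip()
--     words = text.split()
--     n = len(words)
--     if n < line_count:
--         return text
--     q, r = divmod(n, line_count)
--     head = r * (q + 1)
--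
--     def line_of(j):
--         # line index of word j under the front-loaded distribution
--         return j // (q + 1) if j < head else r + (j - head) // q
--
--     parts = [words[0]]
--     for j in range(1, n):
--         parts.append('\n' if line_of(j) != line_of(j - 1) else ' ')
--         parts.append(words[j])
--     return ''.join(parts)
-- ===== Notes on version B (the rewrite author's own statement) =====
-- stated objective: alternative
-- what changed: Instead of A's per-line loop that slices word blocks with a running start accumulator, B assigns each word its line index by a closed-form inverse formula (j//(q+1) in the front-loaded head, r+(j-head)//q after) and makes a single pass over the words, emitting '\n' or ' ' before each word depending on whether its computed line index differs from the previous word's.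
import Mathlib
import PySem

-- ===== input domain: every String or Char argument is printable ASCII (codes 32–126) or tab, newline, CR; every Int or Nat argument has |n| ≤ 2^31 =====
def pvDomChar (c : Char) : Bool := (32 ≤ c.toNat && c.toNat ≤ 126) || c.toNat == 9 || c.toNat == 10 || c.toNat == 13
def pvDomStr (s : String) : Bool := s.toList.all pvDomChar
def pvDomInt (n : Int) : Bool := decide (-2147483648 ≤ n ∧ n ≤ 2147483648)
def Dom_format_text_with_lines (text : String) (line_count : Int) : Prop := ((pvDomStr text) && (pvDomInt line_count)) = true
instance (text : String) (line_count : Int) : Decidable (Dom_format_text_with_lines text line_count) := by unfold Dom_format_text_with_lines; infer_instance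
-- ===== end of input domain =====

-- B replaces A's per-line slicing loop (running start accumulator) by a closed-form inverse map giving each
-- word its line index, then a single pass over the words emitting '\n' or ' ' before each word; alternative
-- decomposition, same cost.

-- ===== PORT A =====
-- the body of A's `for i in range(line_count)` loop, acting on the state (lines, start)
def pvStepA (words : List String) (q r : Int) (st : List String × Int) (i : Int) : List String × Int :=
  let count := q + (if i < r then (1 : Int) else 0)
  let e := st.2 + count
  let line := PySem.Str.join " " (PySem.List.slice words (some st.2) (some e))
  (if line ≠ "" then st.1 ++ [line] else st.1, e)

def format_text_with_lines (text : String) (line_count : Int) : String :=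
  if line_count ≤ 1 then text
  else
    let t := PySem.Str.strip text
    let words := PySem.Str.split₀ t
    if (words.length : Int) < line_count then t
    else
      let q := PySem.Int.floordiv (words.length : Int) line_count
      let r := PySem.Int.mod (words.length : Int) line_count
      let res := (PySem.List.pyRange 0 line_count).foldl (pvStepA words q r) ([], 0)
      PySem.Str.join "\n" res.1

-- ===== PORT B =====
-- Source B's closed-form `line_of(j)`: the line index of word j (head = r*(q+1) words live in the longer lines)
def pvLineOf (q r head j : Int) : Int :=
  if j < head then PySem.Int.floordiv j (q + 1) else r + PySem.Int.floordiv (j - head) q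

def format_text_with_lines_alt (text : String) (line_count : Int) : String :=
  if line_count ≤ 1 then text
  else
    let t := PySem.Str.strip text
    let words := PySem.Str.split₀ t
    if (words.length : Int) < line_count then t
    else
      let q := PySem.Int.floordiv (words.length : Int) line_count
      let r := PySem.Int.mod (words.length : Int) line_count
      let head := r * (q + 1)
      let parts := (PySem.List.pyRange 1 (words.length : Int)).foldl
        (fun acc j =>
          acc ++ [if pvLineOf q r head j ≠ pvLineOf q r head (j - 1) then "\n" else " ",
                  PySem.List.pyGetD words j ""])
        [PySem.List.pyGetD words 0 ""]
      PySem.Str.join "" parts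

-- ===== PRECONDITION & SPEC =====
def Spec_format_text_with_lines (text : String) (line_count : Int) (out : String) : Prop := out = format_text_with_lines_alt text line_count
instance (text : String) (line_count : Int) (out : String) : Decidable (Spec_format_text_with_lines text line_count out) := by unfold Spec_format_text_with_lines; infer_instance

-- ===== CLAIM (what is proved, stated in full; the proofs are below) =====
def Claim_equal_format_text_with_lines : Prop := ∀ (text : String) (line_count : Int), Dom_format_text_with_lines text line_count → Spec_format_text_with_lines text line_count (format_text_with_lines text line_count)

-- ===== LEMMAS AND PROOFS =====

-- every chunk accumulated by split₀.go is nonempty (chunks are only pushed when non-empty)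
theorem pv_go_ne_nil (s : List Char) : ∀ (cur : List Char) (acc : List (List Char)),
    (∀ w ∈ acc, w ≠ []) → ∀ w ∈ PySem.Chars.split₀.go s cur acc, w ≠ [] := by
  induction s with
  | nil =>
    intro cur acc hacc w hw
    simp only [PySem.Chars.split₀.go] at hw
    split at hw
    · exact hacc w (by simpa using hw)
    · rcases (by simpa using hw : w ∈ acc ∨ w = cur.reverse) with h | h
      · exact hacc w h
      · subst h; simp_all [List.isEmpty_iff]
  | cons c rest ih =>
    intro cur acc hacc w hw
    simp only [PySem.Chars.split₀.go] at hw
    split at hw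
    · split at hw
      · exact ih [] acc hacc w hw
      · refine ih [] _ ?_ w hw
        intro v hv
        rcases List.mem_cons.mp hv with h | h
        · subst h; simp_all [List.isEmpty_iff]
        · exact hacc v h
    · exact ih (c :: cur) acc hacc w hw

-- every word of text.split() is a nonempty string
theorem pv_words_ne_empty (t : String) : ∀ w ∈ PySem.Str.split₀ t, w ≠ "" := by
  intro w hw
  simp only [PySem.Str.split₀, List.mem_map] at hw
  obtain ⟨l, hl, rfl⟩ := hw
  have := pv_go_ne_nil t.toList [] [] (by simp) l (by simpa [PySem.Chars.split₀] using hl)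
  intro h
  exact this (by simpa using congrArg String.toList h)

theorem pv_join_space_ne_empty (w : String) (rest : List String) (hw : w ≠ "") :
    PySem.Str.join " " (w :: rest) ≠ "" := by
  intro h
  have h' := congrArg String.toList h
  rw [PySem.Str.join.eq_1, String.toList_ofList] at h'
  cases rest with
  | nil => rw [List.map_cons, List.map_nil, PySem.Chars.join_singleton] at h'
           exact hw (by simpa using congrArg String.ofList h')
  | cons y ys =>
    rw [List.map_cons, List.map_cons, PySem.Chars.join_cons_cons] at h'
    have := congrArg List.length h'
    simp at this

-- start index of line i (proof-side characterisation shared by both ports)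
def pvBnd (q r i : Int) : Int := i * q + min i r

-- the line both programs place at index k
def pvLine (words : List String) (q r : Int) (k : Nat) : String :=
  PySem.Str.join " " (PySem.List.slice words (some (pvBnd q r k)) (some (pvBnd q r (k + 1))))

theorem pv_slice_ne_nil {α : Type} (xs : List α) (a b : Int)
    (ha : 0 ≤ a) (hab : a < b) (hb : b ≤ (xs.length : Int)) :
    PySem.List.slice xs (some a) (some b) ≠ [] := by
  rw [PySem.List.slice_toNat xs ha (by omega)]
  intro h
  have := congrArg List.length h
  simp [List.length_take, List.length_drop] at this
  omega

theorem pvBnd_step (q r k : Int) : pvBnd q r (k + 1) = pvBnd q r k + (q + if k < r then 1 else 0) := by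
  have h : (k + 1) * q = k * q + q := by ring
  unfold pvBnd; rw [h]; split_ifs <;> omega

theorem pvBnd_mono (q r : Int) (hq : 0 ≤ q) {i j : Int} (hij : i ≤ j) :
    pvBnd q r i ≤ pvBnd q r j := by
  unfold pvBnd
  have : min i r ≤ min j r := by omega
  nlinarith [mul_le_mul_of_nonneg_right hij hq]

-- A's loop invariant: after n iterations the accumulator holds the first n lines and start = pvBnd q r n
theorem pv_loopA (words : List String) (lc q r : Int) (n : Nat)
    (hq : 1 ≤ q) (hr0 : 0 ≤ r) (hrlc : r < lc)
    (hlen : (words.length : Int) = lc * q + r)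
    (hw : ∀ w ∈ words, w ≠ "") (hn : (n : Int) ≤ lc) :
    ((List.range n).map Int.ofNat).foldl (pvStepA words q r) ([], 0)
      = ((List.range n).map (pvLine words q r), pvBnd q r n) := by
  induction n with
  | zero => simp [pvBnd]; omega
  | succ k ih =>
    rw [List.range_succ, List.map_append, List.foldl_append,
        ih (by push_cast at hn ⊢; omega)]
    have hcast : ((k + 1 : Nat) : Int) = (k : Int) + 1 := by push_cast; ring
    have hstep := pvBnd_step q r (k : Int)
    have h0k : (0:Int) ≤ pvBnd q r k := by
      have h := pvBnd_mono q r (by omega) (i := 0) (j := (k:Int)) (by positivity)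
      simpa [pvBnd, min_eq_left hr0] using h
    have hlt : pvBnd q r (k:Int) < pvBnd q r ((k:Int)+1) := by
      rw [hstep]; split_ifs <;> omega
    have hub : pvBnd q r ((k:Int)+1) ≤ (words.length : Int) := by
      have h1 : pvBnd q r ((k:Int)+1) ≤ pvBnd q r lc := by
        apply pvBnd_mono q r (by omega); push_cast at hn; omega
      have h2 : pvBnd q r lc = (words.length : Int) := by
        unfold pvBnd; rw [hlen]; omega
      omega
    have hslice : PySem.List.slice words (some (pvBnd q r (k:Int))) (some (pvBnd q r ((k:Int)+1))) ≠ [] :=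
      pv_slice_ne_nil words _ _ h0k hlt hub
    rcases List.exists_cons_of_ne_nil hslice with ⟨w, ws, hws⟩
    have hwmem : w ∈ words := PySem.List.mem_of_mem_slice words _ _ (hws ▸ List.mem_cons_self ..)
    have hline : PySem.Str.join " " (PySem.List.slice words (some (pvBnd q r (k:Int))) (some (pvBnd q r ((k:Int)+1)))) ≠ "" := by
      rw [hws]; exact pv_join_space_ne_empty w ws (hw w hwmem)
    simp only [List.map_cons, List.map_nil]
    rw [List.foldl_cons, List.foldl_nil]
    show pvStepA words q r _ _ = _
    unfold pvStepA
    simp only [Int.ofNat_eq_natCast, hcast, List.map_append, List.map_cons, List.map_nil, ← hstep]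
    rw [if_pos]
    · simp [pvLine]
    · simpa [pvLine] using hline

-- ===== B-side lemmas =====

-- ''.join-style: join with a separator, as head ++ flatMap
theorem pv_join_cons_flatMap (sep : List Char) (c : List Char) (t : List (List Char)) :
    PySem.Chars.join sep (c :: t) = c ++ t.flatMap (fun x => sep ++ x) := by
  induction t generalizing c with
  | nil => simp [PySem.Chars.join_singleton]
  | cons d t ih =>
    rw [PySem.Chars.join_cons_cons, ih d]
    simp [List.flatMap_cons, List.append_assoc]

theorem pv_join_nil_eq_flatten (l : List (List Char)) :
    PySem.Chars.join [] l = l.flatten := by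
  cases l with
  | nil => simp [PySem.Chars.join_nil]
  | cons c t => rw [pv_join_cons_flatMap]; simp [List.flatMap]

theorem pv_join_append_singleton (sep x c : List Char) (t : List (List Char)) :
    PySem.Chars.join sep ((c :: t) ++ [x]) = PySem.Chars.join sep (c :: t) ++ sep ++ x := by
  rw [List.cons_append, pv_join_cons_flatMap, pv_join_cons_flatMap, List.flatMap_append]
  simp [List.append_assoc]

-- flattening the two-element pieces ['sep', 'word'] produced per index
theorem pv_flatten_pair (R : List Int) (s w : Int → String) :
    ((R.flatMap (fun j => [s j, w j])).map String.toList).flatten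
      = R.flatMap (fun j => (s j).toList ++ (w j).toList) := by
  induction R with
  | nil => simp
  | cons a R ih => simp [List.flatMap_cons, ih, List.append_assoc]

-- xs[a:b] decomposed at its head (Nat bounds)
theorem pv_slice_cons (words : List String) (a b : Nat) (hab : a < b) (hbN : b ≤ words.length) :
    PySem.List.slice words (some (a : Int)) (some (b : Int))
      = words.getD a "" :: PySem.List.slice words (some ((a : Int) + 1)) (some (b : Int)) := by
  have h1 : ((a : Int) + 1) = ((a + 1 : Nat) : Int) := by push_cast; ring
  rw [PySem.List.slice_natCast, h1, PySem.List.slice_natCast]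
  have haN : a < words.length := by omega
  rw [List.drop_eq_getElem_cons haN]
  have h2 : b - a = (b - (a + 1)) + 1 := by omega
  rw [h2, List.take_succ_cons, List.getD_eq_getElem words "" haN]

-- Source B's line_of is the inverse of the boundary map: pvBnd k ≤ j < pvBnd (k+1) → line_of j = k
theorem pv_lineOf_eq (q r lc k j : Int) (hq : 1 ≤ q) (hr0 : 0 ≤ r) (hrlc : r < lc)
    (hk0 : 0 ≤ k) (hklc : k < lc)
    (hj1 : pvBnd q r k ≤ j) (hj2 : j < pvBnd q r (k + 1)) :
    pvLineOf q r (r * (q + 1)) j = k := by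
  unfold pvBnd at hj1 hj2
  unfold pvLineOf
  by_cases hkr : k < r
  · have hm1 : min k r = k := by omega
    have hm2 : min (k + 1) r = k + 1 := by omega
    rw [hm1] at hj1; rw [hm2] at hj2
    have hhead : j < r * (q + 1) := by nlinarith
    rw [if_pos hhead]
    rw [PySem.Int.floordiv_eq_iff_of_pos (by omega)]
    constructor <;> nlinarith
  · have hm1 : min k r = r := by omega
    have hm2 : min (k + 1) r = r := by omega
    rw [hm1] at hj1; rw [hm2] at hj2
    have hhead : ¬ (j < r * (q + 1)) := by nlinarith [mul_le_mul_of_nonneg_right (show r ≤ k by omega) (show (0:Int) ≤ q by omega)]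
    rw [if_neg hhead]
    have : PySem.Int.floordiv (j - r * (q + 1)) q = k - r := by
      rw [PySem.Int.floordiv_eq_iff_of_pos (by omega)]
      constructor <;> nlinarith
    rw [this]; ring

-- the separator Source B emits before word j
def pvSepStr (q r j : Int) : String :=
  if pvLineOf q r (r * (q + 1)) j ≠ pvLineOf q r (r * (q + 1)) (j - 1) then "\n" else " "

-- a run of indices all inside one line contributes ' '-prefixed words
theorem pv_gflat (words : List String) (q r : Int) (len : Nat) : ∀ (a : Nat),
    a + len ≤ words.length →
    (∀ j : Int, (a : Int) ≤ j → j < (a : Int) + (len : Int) → pvSepStr q r j = " ") →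
    (PySem.List.pyRange (a : Int) ((a : Int) + (len : Int))).flatMap
        (fun j => (pvSepStr q r j).toList ++ (PySem.List.pyGetD words j "").toList)
      = (PySem.List.slice words (some (a : Int)) (some ((a : Int) + (len : Int)))).flatMap
          (fun w => ' ' :: w.toList) := by
  induction len with
  | zero =>
    intro a _ _
    rw [(by push_cast; ring : (a : Int) + ((0 : Nat) : Int) = (a : Int))]
    rw [PySem.List.pyRange_one_eq_nil (by omega), PySem.List.slice_natCast]
    simp
  | succ m ih =>
    intro a hN hsep
    have hlt : (a : Int) < (a : Int) + ((m + 1 : Nat) : Int) := by push_cast; omega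
    rw [PySem.List.pyRange_one_cons hlt, List.flatMap_cons]
    have hcast : (a : Int) + 1 = ((a + 1 : Nat) : Int) := by push_cast; ring
    have hcast2 : (a : Int) + ((m + 1 : Nat) : Int) = ((a + 1 : Nat) : Int) + ((m : Nat) : Int) := by
      push_cast; ring
    rw [hcast, hcast2]
    rw [ih (a + 1) (by omega) (by intro j h1 h2; exact hsep j (by push_cast at h1 ⊢; omega) (by push_cast at h2 ⊢; omega))]
    have hslice : PySem.List.slice words (some (a : Int)) (some (((a + 1 : Nat) : Int) + ((m : Nat) : Int)))
        = words.getD a "" :: PySem.List.slice words (some ((a : Int) + 1)) (some (((a + 1 : Nat) : Int) + ((m : Nat) : Int))) := by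
      have h3 : (((a + 1 : Nat) : Int) + ((m : Nat) : Int)) = ((a + 1 + m : Nat) : Int) := by push_cast; ring
      rw [h3]
      exact pv_slice_cons words a (a + 1 + m) (by omega) (by omega)
    rw [(by push_cast; ring : ((a : Int) + 1) = ((a + 1 : Nat) : Int))] at hslice
    rw [hslice, List.flatMap_cons]
    rw [hsep (a : Int) (le_refl _) (by push_cast; omega)]
    rw [PySem.List.pyGetD_natCast]
    simp

theorem pv_sep_inside (q r lc k j : Int) (hq : 1 ≤ q) (hr0 : 0 ≤ r) (hrlc : r < lc)
    (hk0 : 0 ≤ k) (hklc : k < lc)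
    (h1 : pvBnd q r k < j) (h2 : j < pvBnd q r (k + 1)) : pvSepStr q r j = " " := by
  unfold pvSepStr
  rw [pv_lineOf_eq q r lc k j hq hr0 hrlc hk0 hklc (by omega) h2,
      pv_lineOf_eq q r lc k (j - 1) hq hr0 hrlc hk0 hklc (by omega) (by omega)]
  simp

theorem pv_sep_bound (q r lc k : Int) (hq : 1 ≤ q) (hr0 : 0 ≤ r) (hrlc : r < lc)
    (hk1 : 1 ≤ k) (hklc : k < lc) : pvSepStr q r (pvBnd q r k) = "\n" := by
  have hgap1 := pvBnd_step q r k
  have hgap0 := pvBnd_step q r (k - 1)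
  have e : k - 1 + 1 = k := by ring
  rw [e] at hgap0
  unfold pvSepStr
  rw [pv_lineOf_eq q r lc k (pvBnd q r k) hq hr0 hrlc (by omega) hklc (le_refl _)
        (by split_ifs at hgap1 <;> omega),
      pv_lineOf_eq q r lc (k - 1) (pvBnd q r k - 1) hq hr0 hrlc (by omega) (by omega)
        (by split_ifs at hgap0 <;> omega) (by rw [e]; omega)]
  rw [if_pos (by omega)]

-- ' '.join(words[a:b]) at the character level: first word, then ' '-prefixed rest
theorem pv_join_slice (words : List String) (a b : Int)
    (h0 : 0 ≤ a) (hab : a < b) (hb : b ≤ (words.length : Int)) :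
    (PySem.Str.join " " (PySem.List.slice words (some a) (some b))).toList
      = (PySem.List.pyGetD words a "").toList
        ++ (PySem.List.slice words (some (a + 1)) (some b)).flatMap (fun w => ' ' :: w.toList) := by
  obtain ⟨an, rfl⟩ : ∃ n : Nat, (n : Int) = a := ⟨a.toNat, by omega⟩
  obtain ⟨bn, rfl⟩ : ∃ n : Nat, (n : Int) = b := ⟨b.toNat, by omega⟩
  rw [PySem.Str.toList_join,
      pv_slice_cons words an bn (by exact_mod_cast hab) (by exact_mod_cast hb),
      List.map_cons, pv_join_cons_flatMap, PySem.List.pyGetD_natCast]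
  simp [List.flatMap_map]

-- B's single pass up to boundary pvBnd k equals the '\n'-join of the first k lines
theorem pv_mainB (words : List String) (lc q r : Int)
    (hq : 1 ≤ q) (hr0 : 0 ≤ r) (hrlc : r < lc)
    (hlen : (words.length : Int) = lc * q + r) :
    ∀ k : Nat, 1 ≤ k → (k : Int) ≤ lc →
    (PySem.List.pyGetD words 0 "").toList
      ++ (PySem.List.pyRange 1 (pvBnd q r (k : Int))).flatMap
          (fun j => (pvSepStr q r j).toList ++ (PySem.List.pyGetD words j "").toList)
      = PySem.Chars.join ['\n'] ((List.range k).map (fun i => (pvLine words q r i).toList)) := by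
  have hb0 : pvBnd q r 0 = 0 := by unfold pvBnd; omega
  have hblc : pvBnd q r lc = (words.length : Int) := by unfold pvBnd; rw [hlen]; omega
  have hbndN : ∀ m : Int, m ≤ lc → pvBnd q r m ≤ (words.length : Int) := by
    intro m hm
    have h1 := pvBnd_mono q r (by omega) hm
    omega
  have hstep' : ∀ m : Int, pvBnd q r m + 1 ≤ pvBnd q r (m + 1) := by
    intro m; have := pvBnd_step q r m; split_ifs at this <;> omega
  have hbnd0 : ∀ m : Int, 0 ≤ m → 0 ≤ pvBnd q r m := by
    intro m hm
    have := pvBnd_mono q r (by omega) hm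
    omega
  intro k
  induction k with
  | zero => intro h; omega
  | succ k ih =>
    intro _ hk1
    by_cases hk : k = 0
    · -- base case: one line
      subst hk
      have hn1 : ((0 + 1 : Nat) : Int) = 1 := by norm_num
      rw [hn1]
      have h1b : 1 ≤ pvBnd q r 1 := by have h := hstep' 0; norm_num at h; omega
      have hbN : pvBnd q r 1 ≤ (words.length : Int) := hbndN 1 (by push_cast at hk1; omega)
      have hg := pv_gflat words q r (pvBnd q r 1 - 1).toNat 1 (by omega)
        (by
          intro j hj1 hj2
          push_cast at hj1 hj2
          refine pv_sep_inside q r lc 0 j hq hr0 hrlc (le_refl 0) (by push_cast at hk1; omega) (by omega) ?_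
          have e01 : pvBnd q r (0 + 1) = pvBnd q r 1 := by norm_num
          omega)
      push_cast at hg
      rw [show (1 : Int) + ((pvBnd q r 1 - 1).toNat : Int) = pvBnd q r 1 from by omega] at hg
      rw [hg]
      rw [List.range_one, List.map_cons, List.map_nil, PySem.Chars.join_singleton]
      have hjs := pv_join_slice words 0 (pvBnd q r 1) (le_refl 0) (by omega) hbN
      rw [show (0 : Int) + 1 = 1 from by norm_num] at hjs
      have eA : pvBnd q r ((0 : Nat) : Int) = 0 := by norm_num [hb0]
      have eB : pvBnd q r (((0 : Nat) : Int) + 1) = pvBnd q r 1 := by norm_num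
      rw [pvLine, eA, eB, hjs]
    · -- inductive step: append line k
      have hk1' : (1 : Nat) ≤ k := by omega
      have hklc : (k : Int) ≤ lc := by push_cast at hk1 ⊢; omega
      have hkl : (k : Int) < lc := by push_cast at hk1; omega
      have hcast : ((k + 1 : Nat) : Int) = (k : Int) + 1 := by push_cast; ring
      rw [hcast]
      have h1k : 1 ≤ pvBnd q r (k : Int) := by
        have := pvBnd_mono q r (by omega) (show (1 : Int) ≤ (k : Int) by exact_mod_cast hk1')
        have h := hstep' 0; norm_num at h; omega
      have hlt : pvBnd q r (k : Int) < pvBnd q r ((k : Int) + 1) := by have := hstep' (k : Int); omega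
      have hubN : pvBnd q r ((k : Int) + 1) ≤ (words.length : Int) := hbndN _ (by omega)
      rw [PySem.List.pyRange_one_append 1 (pvBnd q r (k : Int)) (pvBnd q r ((k : Int) + 1)) h1k (by omega),
          List.flatMap_append, ← List.append_assoc, ih hk1' hklc,
          PySem.List.pyRange_one_cons hlt, List.flatMap_cons,
          pv_sep_bound q r lc (k : Int) hq hr0 hrlc (by exact_mod_cast hk1') hkl]
      have hg := pv_gflat words q r (pvBnd q r ((k : Int) + 1) - pvBnd q r (k : Int) - 1).toNat
        (pvBnd q r (k : Int) + 1).toNat (by omega)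
        (by
          intro j hj1 hj2
          refine pv_sep_inside q r lc (k : Int) j hq hr0 hrlc (by positivity) hkl (by omega) (by omega))
      rw [show (((pvBnd q r (k : Int) + 1).toNat : Nat) : Int) = pvBnd q r (k : Int) + 1 from by omega] at hg
      rw [show pvBnd q r (k : Int) + 1 + (((pvBnd q r ((k : Int) + 1) - pvBnd q r (k : Int) - 1).toNat : Nat) : Int) = pvBnd q r ((k : Int) + 1) from by omega] at hg
      rw [hg]
      have hjs := pv_join_slice words (pvBnd q r (k : Int)) (pvBnd q r ((k : Int) + 1)) (by omega) hlt hubN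
      rw [List.range_succ, List.map_append, List.map_cons, List.map_nil]
      have hne : (List.range k).map (fun i => (pvLine words q r i).toList) ≠ [] := by
        simp [List.range_eq_nil]; omega
      rcases hL : (List.range k).map (fun i => (pvLine words q r i).toList) with _ | ⟨c, t⟩
      · exact absurd hL hne
      · rw [pv_join_append_singleton]
        rw [← hL]
        simp only [pvLine]
        rw [hjs]
        simp [List.append_assoc]

theorem pv_main (text : String) (lc : Int) :
    format_text_with_lines text lc = format_text_with_lines_alt text lc := by
  unfold format_text_with_lines format_text_with_lines_alt
  dsimp only
  split_ifs with h1 h2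
  · rfl
  · rfl
  · set t := PySem.Str.strip text
    set words := PySem.Str.split₀ t with hwords
    set q := PySem.Int.floordiv (words.length : Int) lc with hqdef
    set r := PySem.Int.mod (words.length : Int) lc with hrdef
    have hlc : 0 < lc := by omega
    have hq : 1 ≤ q := by
      rw [hqdef, PySem.Int.le_floordiv_iff_mul_le hlc]; omega
    have hr0 : 0 ≤ r := PySem.Int.mod_nonneg _ hlc
    have hrlc : r < lc := PySem.Int.mod_lt _ hlc
    have hlen : (words.length : Int) = lc * q + r := by
      have h := PySem.Int.floordiv_mul_add_mod (words.length : Int) lc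
      rw [← hqdef, ← hrdef, mul_comm] at h
      omega
    have hw := pv_words_ne_empty t
    rw [← hwords] at hw
    set n := lc.toNat with hndef
    have hlcn : lc = (n : Int) := by omega
    have hrange : PySem.List.pyRange 0 lc = (List.range n).map Int.ofNat := by
      rw [hlcn, PySem.List.pyRange_zero_natCast]; rfl
    have hA := pv_loopA words lc q r n hq hr0 hrlc hlen hw (by omega)
    rw [hrange, hA]
    rw [PySem.List.foldl_append_eq_flatMap
          (fun j => [if pvLineOf q r (r * (q + 1)) j ≠ pvLineOf q r (r * (q + 1)) (j - 1) then "\n" else " ",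
                     PySem.List.pyGetD words j ""])
          (PySem.List.pyRange 1 (words.length : Int)) [PySem.List.pyGetD words 0 ""]]
    rw [PySem.Str.join.eq_1, PySem.Str.join.eq_1]
    refine congrArg String.ofList ?_
    rw [show ("\n" : String).toList = ['\n'] from rfl, show ("" : String).toList = ([] : List Char) from rfl]
    rw [pv_join_nil_eq_flatten, List.map_append, List.flatten_append,
        pv_flatten_pair (PySem.List.pyRange 1 (words.length : Int)) _ (fun j => PySem.List.pyGetD words j "")]
    have hm := pv_mainB words lc q r hq hr0 hrlc hlen n (by omega) (by omega)
    have hbN : pvBnd q r (n : Int) = (words.length : Int) := by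
      rw [← hlcn]; unfold pvBnd; rw [hlen]; omega
    rw [hbN] at hm
    rw [List.map_map]
    simp only [List.map_cons, List.map_nil, List.flatten_cons, List.flatten_nil, List.append_nil]
    exact hm.symm

-- ===== VERDICT (by name: the statement is the Claim_ definition above) =====
theorem format_text_with_lines_spec : Claim_equal_format_text_with_lines := by
  intro text lc _
  unfold Spec_format_text_with_lines
  exact pv_main text lc
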